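-- pv_equiv track=rewrite | github.com/jackSmith277/dealer | 插件/汽车服务/评论分析.py | representative_sentence
-- ===== SOURCE A (Python) =====
-- from typing import Dict, List, Tuple
--
-- def representative_sentence(sentences: List[str], positive_words: List[str], negative_words: List[str], prefer_negative: bool) -> str:
--     preferred = negative_words if prefer_negative else positive_words
--     backup = positive_words + negative_words if prefer_negative else negative_words + positive_words
--     for word in preferred:
--         for sentence in sentences:
--             if word in sentence and 8 <= len(sentence) <= 90:
--                 return sentence
--     for word in backup:
--         for sentence in sentences:
--             if word in sentence and 8 <= len(sentence) <= 90:
--                 return sentence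
--     for sentence in sentences:
--         if 8 <= len(sentence) <= 90:
--             return sentence
--     return ""
-- ===== SOURCE B (Python) =====
-- def representative_sentence(sentences, positive_words, negative_words, prefer_negative):
--     # Single pass over the sentences (sentence-major argmin), not word-major scans:
--     # keep the first eligible sentence whose best-contained-word rank is strictly
--     # smallest; the inner word scan only ever looks at ranks below the current best.
--     order = (negative_words + positive_words) if prefer_negative else (positive_words + negative_words)
--     candidates = [s for s in sentences if 8 <= len(s) <= 90]
--     best_rank = len(order)
--     best = None
--     for s in candidates:
--         for i in range(best_rank):
--             if order[i] in s:
--                 best_rank, best = i, s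
--                 break
--     if best is not None:
--         return best
--     return candidates[0] if candidates else ""
-- ===== Notes on version B (the rewrite author's own statement) =====
-- stated objective: faster
-- what changed: B inverts the traversal: instead of A's word-major scans (each priority word rescanned over all sentences, and the preferred words rescanned again in the backup block), B makes one sentence-major pass that keeps the argmin word rank per length-eligible sentence, with the inner word scan bounded by the current best rank so it shrinks as better matches are found.
import Mathlib
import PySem

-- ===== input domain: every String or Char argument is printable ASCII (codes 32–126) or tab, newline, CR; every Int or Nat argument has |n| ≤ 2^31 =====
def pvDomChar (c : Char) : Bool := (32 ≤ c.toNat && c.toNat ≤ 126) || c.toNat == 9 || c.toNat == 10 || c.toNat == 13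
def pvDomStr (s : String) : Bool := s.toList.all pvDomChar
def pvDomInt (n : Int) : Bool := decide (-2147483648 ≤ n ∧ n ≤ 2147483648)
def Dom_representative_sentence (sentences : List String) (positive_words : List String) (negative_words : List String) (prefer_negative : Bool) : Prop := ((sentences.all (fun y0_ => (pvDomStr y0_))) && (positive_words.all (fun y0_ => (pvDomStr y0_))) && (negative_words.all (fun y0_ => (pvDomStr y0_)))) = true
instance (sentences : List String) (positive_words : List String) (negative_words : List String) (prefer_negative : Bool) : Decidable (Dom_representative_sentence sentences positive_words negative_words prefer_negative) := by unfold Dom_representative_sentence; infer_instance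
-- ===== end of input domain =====

-- ===== PORT A =====
-- B replaces A's word-major scans by one sentence-major argmin pass with a shrinking rank bound (measured faster); return value only.
def representative_sentence (sentences : List String) (positive_words : List String) (negative_words : List String) (prefer_negative : Bool) : String :=
  let preferred := if prefer_negative then negative_words else positive_words
  let backup := if prefer_negative then positive_words ++ negative_words else negative_words ++ positive_words
  match preferred.findSome? (fun word => sentences.find? (fun sentence =>
      PySem.Str.isIn word sentence && decide (8 ≤ PySem.Str.len sentence ∧ PySem.Str.len sentence ≤ 90))) with
  | some s => s
  | none =>
    match backup.findSome? (fun word => sentences.find? (fun sentence =>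
        PySem.Str.isIn word sentence && decide (8 ≤ PySem.Str.len sentence ∧ PySem.Str.len sentence ≤ 90))) with
    | some s => s
    | none =>
      match sentences.find? (fun sentence => decide (8 ≤ PySem.Str.len sentence ∧ PySem.Str.len sentence ≤ 90)) with
      | some s => s
      | none => ""

-- ===== PORT B =====
-- Source B's main loop: one pass over the candidates, keeping the best (lowest) word rank and its sentence;
-- `for i in range(best_rank): if order[i] in s: … break` is ported as findIdx? over `order.take best_rank`
-- (best_rank starts at len(order) and only ever shrinks, so the prefix view is exact).
def pvAltLoop (order : List String) : List String → Nat → Option String → Option String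
  | [], _, best => best
  | s :: rest, best_rank, best =>
    match (order.take best_rank).findIdx? (fun w => PySem.Str.isIn w s) with
    | some i => pvAltLoop order rest i (some s)
    | none => pvAltLoop order rest best_rank best

def representative_sentence_alt (sentences : List String) (positive_words : List String) (negative_words : List String) (prefer_negative : Bool) : String :=
  let order := if prefer_negative then negative_words ++ positive_words else positive_words ++ negative_words
  let candidates := sentences.filter (fun s => decide (8 ≤ PySem.Str.len s ∧ PySem.Str.len s ≤ 90))
  match pvAltLoop order candidates order.length none with
  | some s => s
  | none => (candidates.head?).getD ""

-- ===== PRECONDITION & SPEC =====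
def Spec_representative_sentence (sentences : List String) (positive_words : List String) (negative_words : List String) (prefer_negative : Bool) (out : String) : Prop := out = representative_sentence_alt sentences positive_words negative_words prefer_negative
instance (sentences : List String) (positive_words : List String) (negative_words : List String) (prefer_negative : Bool) (out : String) : Decidable (Spec_representative_sentence sentences positive_words negative_words prefer_negative out) := by unfold Spec_representative_sentence; infer_instance

-- ===== CLAIM (what is proved, stated in full; the proofs are below) =====
def Claim_equal_representative_sentence : Prop := ∀ (sentences : List String) (positive_words : List String) (negative_words : List String) (prefer_negative : Bool), Dom_representative_sentence sentences positive_words negative_words prefer_negative → Spec_representative_sentence sentences positive_words negative_words prefer_negative (representative_sentence sentences positive_words negative_words prefer_negative)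

-- ===== LEMMAS AND PROOFS =====

-- proof-only: best (rank, sentence) pair among `cands`, ranks taken over `order.take n`,
-- ties (equal rank) resolved towards the earlier sentence.
def pvBP (order : List String) (n : Nat) : List String → Option (Nat × String)
  | [] => none
  | s :: t =>
    match (order.take n).findIdx? (fun w => PySem.Str.isIn w s), pvBP order n t with
    | none, b => b
    | some i, none => some (i, s)
    | some i, some (r, s') => if i ≤ r then some (i, s) else some (r, s')

-- restricting the rank bound from n to i ≤ n keeps exactly the pairs of rank < i
theorem pvBP_take (order : List String) (t : List String) (i n : Nat) (h : i ≤ n) :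
    pvBP order i t = (pvBP order n t).bind (fun p => if p.1 < i then some p else none) := by
  induction t with
  | nil => simp [pvBP]
  | cons s t ih =>
    have hr : (order.take i).findIdx? (fun w => PySem.Str.isIn w s)
        = ((order.take n).findIdx? (fun w => PySem.Str.isIn w s)).bind
            (Option.guard (fun j => j < i)) := by
      rw [show (List.take i order) = (List.take n order).take i from by
            rw [List.take_take, Nat.min_eq_left h],
        List.findIdx?_take]
    simp only [pvBP, hr, ih]
    cases hx : (order.take n).findIdx? (fun w => PySem.Str.isIn w s) with
    | none => simp only [Option.bind_none]
    | some jh =>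
      simp only [Option.bind_some, Option.guard]
      by_cases hji : jh < i
      · simp only [hji, decide_true, if_pos]
        cases pvBP order n t with
        | none => simp; omega
        | some p =>
          obtain ⟨r, s'⟩ := p
          by_cases hri : r < i <;> by_cases hjr : jh ≤ r <;>
            simp [hri, hjr] <;> omega
      · simp only [hji, decide_false]
        cases pvBP order n t with
        | none => simp; omega
        | some p =>
          obtain ⟨r, s'⟩ := p
          by_cases hjr : jh ≤ r <;> simp [hjr] <;> first | omega | (split_ifs <;> first | rfl | omega)

-- combining step: a hit of rank i for the head sentence against the best of the tail
theorem pvBP_cons_or (order : List String) (t : List String) (s : String) (n i : Nat)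
    (h : (order.take n).findIdx? (fun w => PySem.Str.isIn w s) = some i) :
    ((pvBP order i t).map Prod.snd).or (some s) = (pvBP order n (s :: t)).map Prod.snd := by
  have hin : i ≤ n := by
    obtain ⟨hi, -, -⟩ := List.findIdx?_eq_some_iff_getElem.mp h
    simp only [List.length_take] at hi
    omega
  rw [pvBP_take order t i n hin]
  simp only [pvBP, h]
  cases hb : pvBP order n t with
  | none => simp
  | some p =>
    obtain ⟨r, s'⟩ := p
    by_cases hri : r < i
    · have : ¬ i ≤ r := by omega
      simp [hri, this]
    · have : i ≤ r := by omega
      simp [hri, this]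

-- pointwise-equal scans agree (the head sentence contains no word of the prefix)
theorem pvFindSome?_congr {α β : Type} (l : List α) (f g : α → Option β)
    (h : ∀ x ∈ l, f x = g x) : l.findSome? f = l.findSome? g := by
  induction l with
  | nil => rfl
  | cons a t ih =>
    simp only [List.findSome?_cons, h a (List.mem_cons_self)]
    cases g a with
    | none => exact ih (fun x hx => h x (List.mem_cons_of_mem _ hx))
    | some b => rfl

-- A's word-major scan over the first n priority words equals the best-rank pair of B's pass
theorem pvL1 (order : List String) :
    ∀ (t : List String) (n : Nat),
      (order.take n).findSome? (fun w => t.find? (fun s => PySem.Str.isIn w s))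
        = (pvBP order n t).map Prod.snd := by
  intro t
  induction t with
  | nil => intro n; simp [pvBP]
  | cons s t ih =>
    intro n
    cases hx : (order.take n).findIdx? (fun w => PySem.Str.isIn w s) with
    | none =>
      have hnone : ∀ w ∈ order.take n, PySem.Str.isIn w s = false := by
        intro w hw
        have := List.findIdx?_eq_none_iff.mp hx w hw
        simpa using this
      have : (order.take n).findSome? (fun w => (s :: t).find? (fun x => PySem.Str.isIn w x))
          = (order.take n).findSome? (fun w => t.find? (fun x => PySem.Str.isIn w x)) := by
        apply pvFindSome?_congr
        intro w hw
        simp only [List.find?_cons, hnone w hw]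
      rw [this, ih n]
      simp only [pvBP, hx]
    | some i =>
      obtain ⟨hi, hpi, hlt⟩ := List.findIdx?_eq_some_iff_getElem.mp hx
      -- decompose order.take n at index i
      have hdec : order.take n = (order.take n).take i ++ (order.take n)[i] :: (order.take n).drop (i + 1) := by
        rw [List.getElem_cons_drop, List.take_append_drop]
      rw [← pvBP_cons_or order t s n i hx]
      conv_lhs => rw [hdec]
      rw [List.findSome?_append]
      have h1 : ((order.take n).take i).findSome? (fun w => (s :: t).find? (fun x => PySem.Str.isIn w x))
          = (pvBP order i t).map Prod.snd := by
        have hcong : ((order.take n).take i).findSome? (fun w => (s :: t).find? (fun x => PySem.Str.isIn w x))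
            = ((order.take n).take i).findSome? (fun w => t.find? (fun x => PySem.Str.isIn w x)) := by
          apply pvFindSome?_congr
          intro w hw
          obtain ⟨j, hj, hwj⟩ := List.getElem_of_mem hw
          have hjlt : j < i := by
            have := hj; simp at this; omega
          have hfalse : PySem.Str.isIn w s = false := by
            rw [← hwj, List.getElem_take]
            simpa using hlt j hjlt
          simp only [List.find?_cons, hfalse]
        rw [hcong]
        have : (order.take n).take i = order.take i := by
          rw [List.take_take]
          congr 1
          have : i ≤ n := by
            have := hi; simp at this; omega
          omega
        rw [this, ih i]
      rw [h1]
      have h2 : ((order.take n)[i] :: (order.take n).drop (i + 1)).findSome?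
          (fun w => (s :: t).find? (fun x => PySem.Str.isIn w x)) = some s := by
        simp only [List.getElem_take, PySem.Str.isIn_eq] at hpi
        simp [List.find?_cons, hpi]
      rw [h2]

-- B's loop equals the best-rank pair (with the carried best as fallback)
theorem pvL3 (order : List String) :
    ∀ (t : List String) (br : Nat) (best : Option String),
      pvAltLoop order t br best = ((pvBP order br t).map Prod.snd).or best := by
  intro t
  induction t with
  | nil => intro br best; simp [pvAltLoop, pvBP]
  | cons s t ih =>
    intro br best
    cases hx : (order.take br).findIdx? (fun w => PySem.Str.isIn w s) with
    | none =>
      simp only [pvAltLoop, hx, ih]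
      rw [List.findIdx?_take] at hx
      simp only [PySem.Str.isIn_eq] at hx
      simp [pvBP, hx]
    | some i =>
      simp only [pvAltLoop, hx, ih]
      rw [pvBP_cons_or order t s br i hx]
      have : ∃ p, pvBP order br (s :: t) = some p := by
        simp only [pvBP, hx]
        cases pvBP order br t with
        | none => exact ⟨_, rfl⟩
        | some p => obtain ⟨r, s'⟩ := p; by_cases h : i ≤ r <;> simp [h]
      obtain ⟨p, hp⟩ := this
      simp [hp]

theorem pv_match_getD (o : Option String) :
    (match o with | some s => s | none => "") = o.getD "" := by
  cases o <;> rfl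

theorem pv_inner_eq (word : String) (sentences : List String) :
    sentences.find? (fun sentence =>
      PySem.Str.isIn word sentence && decide (8 ≤ PySem.Str.len sentence ∧ PySem.Str.len sentence ≤ 90))
    = (sentences.filter (fun s => decide (8 ≤ PySem.Str.len s ∧ PySem.Str.len s ≤ 90))).find?
        (fun s => PySem.Str.isIn word s) := by
  rw [List.find?_filter]
  congr 1
  funext s
  simp [Bool.and_comm]

-- ===== VERDICT (by name: the statement is the Claim_ definition above) =====
theorem representative_sentence_spec : Claim_equal_representative_sentence := by
  intro sentences positive_words negative_words prefer_negative _
  unfold Spec_representative_sentence representative_sentence representative_sentence_alt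
  simp only [pv_inner_eq, List.head?_filter]
  cases prefer_negative <;> simp only [if_true, if_false, Bool.false_eq_true] <;>
  · set cands := sentences.filter (fun s => decide (8 ≤ PySem.Str.len s ∧ PySem.Str.len s ≤ 90)) with hc
    set F := fun word => cands.find? (fun s => PySem.Str.isIn word s) with hF
    rw [pvL3]
    have hfull : ∀ (ws : List String), ws.findSome? F = (pvBP ws ws.length cands).map Prod.snd := by
      intro ws
      have := pvL1 ws cands ws.length
      rw [List.take_length] at this
      exact this
    rw [← hfull]
    simp only [List.findSome?_append]
    cases hn : List.findSome? F negative_words <;> cases hp : List.findSome? F positive_words <;>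
      simp [Option.or, pv_match_getD]
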